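-- pv_equiv track=rewrite | github.com/MadRock33/Khokhlov_Dimitrii_20221_24 | Homeworks/HW7/7.3.py | get_possible_pins
-- ===== SOURCE A (Python) =====
-- def get_possible_pins(observed_pin:str) -> list[str,...]:
--     adjacent_digits = {
--         '0': ['0', '8'],
--         '1': ['1', '2', '4'],
--         '2': ['1', '2', '3', '5'],
--         '3': ['2', '3', '6'],
--         '4': ['1', '4', '5', '7'],
--         '5': ['2', '4', '5', '6', '8'],
--         '6': ['3', '5', '6', '9'],
--         '7': ['4', '7', '8'],
--         '8': ['5', '7', '8', '9', '0'],
--         '9': ['6', '8', '9']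
--     }
--
--
--     result = ['']
--
--
--     for digit in observed_pin:
--
--         result = [prefix + neighbor for prefix in result for neighbor in adjacent_digits[digit]]
--
--     return result
-- ===== SOURCE B (Python) =====
-- def get_possible_pins(observed_pin: str) -> list:
--     neighbors = {'0': '08', '1': '124', '2': '1235', '3': '236', '4': '1457',
--                  '5': '24568', '6': '3569', '7': '478', '8': '57890', '9': '689'}
--     if not observed_pin:
--         return ['']
--     suffixes = get_possible_pins(observed_pin[1:])
--     return [n + s for n in neighbors[observed_pin[0]] for s in suffixes]
-- ===== Notes on version B (the rewrite author's own statement) =====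
-- stated objective: alternative
-- what changed: Replaces the iterative rebuild of a growing prefix list over a dict of neighbor lists by direct recursion on the string itself, with the neighbor table stored as compact strings whose characters are prepended to the recursively computed suffix pins.
-- outside the precondition, e.g. on get_possible_pins('1a'): A raises KeyError, B raises KeyError
import Mathlib
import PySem

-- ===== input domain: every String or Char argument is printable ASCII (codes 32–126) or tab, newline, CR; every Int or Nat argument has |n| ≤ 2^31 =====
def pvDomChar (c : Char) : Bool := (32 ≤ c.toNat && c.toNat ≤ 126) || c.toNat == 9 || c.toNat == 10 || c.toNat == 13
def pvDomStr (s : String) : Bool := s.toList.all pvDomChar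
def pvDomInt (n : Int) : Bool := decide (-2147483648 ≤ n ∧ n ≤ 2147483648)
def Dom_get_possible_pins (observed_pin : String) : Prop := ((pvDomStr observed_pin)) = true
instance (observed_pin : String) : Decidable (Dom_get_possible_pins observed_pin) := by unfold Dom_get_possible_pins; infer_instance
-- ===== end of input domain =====

-- B replaces A's iterative rebuild of a growing prefix list by direct recursion on the string,
-- with the neighbor table stored as strings instead of lists (alternative decomposition, same cost).

-- ===== PORT A =====
-- the dict literal adjacent_digits of A (dict of digit -> list of neighbor digit strings)
def adjacent_digits_a : PySem.Dict String (List String) :=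
  PySem.Dict.mk
  [("0", ["0", "8"]), ("1", ["1", "2", "4"]), ("2", ["1", "2", "3", "5"]),
   ("3", ["2", "3", "6"]), ("4", ["1", "4", "5", "7"]), ("5", ["2", "4", "5", "6", "8"]),
   ("6", ["3", "5", "6", "9"]), ("7", ["4", "7", "8"]), ("8", ["5", "7", "8", "9", "0"]),
   ("9", ["6", "8", "9"])]

-- adjacent_digits[digit]; on a missing key Python raises KeyError (excluded by Pre_), so getD [] is exact on Pre_
def adjLookupA (d : Char) : List String :=
  (PySem.Dict.get? adjacent_digits_a (String.singleton d)).getD []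

def get_possible_pins (observed_pin : String) : List String :=
  observed_pin.toList.foldl
    (fun result digit => result.flatMap (fun prefix_ => (adjLookupA digit).map (fun neighbor => prefix_ ++ neighbor)))
    [""]

-- ===== PORT B =====
-- B's neighbor table: digit -> STRING of neighbor digits
def neighbors_b : PySem.Dict String String :=
  PySem.Dict.mk
  [("0", "08"), ("1", "124"), ("2", "1235"), ("3", "236"), ("4", "1457"),
   ("5", "24568"), ("6", "3569"), ("7", "478"), ("8", "57890"), ("9", "689")]

-- neighbors[observed_pin[0]]; KeyError (missing key) excluded by Pre_
def neighborsLookupB (d : Char) : String :=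
  (PySem.Dict.get? neighbors_b (String.singleton d)).getD ""

-- B recurses on the string itself: pins for c :: cs = every neighbor char of c prepended to every pin of cs
def get_possible_pins_alt_go : List Char → List String
  | [] => [""]
  | c :: cs =>
    let suffixes := get_possible_pins_alt_go cs
    (neighborsLookupB c).toList.flatMap (fun n => suffixes.map (fun s => String.singleton n ++ s))

def get_possible_pins_alt (observed_pin : String) : List String :=
  get_possible_pins_alt_go observed_pin.toList

-- ===== PRECONDITION & SPEC =====
-- Pre_ excludes inputs containing a non-digit character, on which Python A (and B) raise KeyError.
def Pre_get_possible_pins (observed_pin : String) : Prop :=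
  (observed_pin.toList.all (fun c => c.isDigit)) = true
instance (observed_pin : String) : Decidable (Pre_get_possible_pins observed_pin) := by
  unfold Pre_get_possible_pins; infer_instance

def pvWitness_get_possible_pins : String := "123"

def Spec_get_possible_pins (observed_pin : String) (out : List String) : Prop := out = get_possible_pins_alt observed_pin
instance (observed_pin : String) (out : List String) : Decidable (Spec_get_possible_pins observed_pin out) := by unfold Spec_get_possible_pins; infer_instance

-- ===== CLAIM (what is proved, stated in full; the proofs are below) =====
def Claim_equal_get_possible_pins : Prop := ∀ (observed_pin : String), Dom_get_possible_pins observed_pin → Pre_get_possible_pins observed_pin → Spec_get_possible_pins observed_pin (get_possible_pins observed_pin)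

-- ===== LEMMAS AND PROOFS =====

-- A's per-digit neighbor LIST is B's per-digit neighbor STRING split into singletons (true for every char:
-- on a non-key both sides are empty)
-- A's neighbor LIST for a char is B's neighbor STRING split into singleton strings (on a non-key both are empty)
set_option maxHeartbeats 1000000 in
theorem adj_eq (c : Char) :
    adjLookupA c = (neighborsLookupB c).toList.map String.singleton := by
  unfold adjLookupA neighborsLookupB adjacent_digits_a neighbors_b
  simp only [PySem.Dict.get?_mk_cons, beq_iff_eq, String.ext_iff, String.singleton]
  split_ifs <;> first | decide | simp [PySem.Dict.get?]

-- the loop-vs-recursion bridge: A's foldl over any seed R equals prefixing each element of R to B's pins of cs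
theorem foldl_eq_flatMap_go (cs : List Char) (R : List String) :
    cs.foldl
      (fun result digit => result.flatMap (fun p => (adjLookupA digit).map (fun n => p ++ n)))
      R
    = R.flatMap (fun p => (get_possible_pins_alt_go cs).map (fun s => p ++ s)) := by
  induction cs generalizing R with
  | nil => simp [get_possible_pins_alt_go]
  | cons c cs ih =>
    rw [List.foldl_cons, ih]
    simp only [get_possible_pins_alt_go, adj_eq]
    simp [List.flatMap_map, List.map_flatMap, List.flatMap_assoc, List.map_map,
      Function.comp_def, ← String.append_assoc]

-- ===== VERDICT (by name: the statement is the Claim_ definition above) =====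
theorem get_possible_pins_spec : Claim_equal_get_possible_pins := by
  intro s _ _
  unfold Spec_get_possible_pins get_possible_pins get_possible_pins_alt
  rw [foldl_eq_flatMap_go]
  simp
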